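-- pv_equiv track=rewrite | github.com/weiminglong/agent-table-brief | src/agent_table_brief/repository.py | _build_downstream_map
-- ===== SOURCE A (Python) =====
-- from collections import defaultdict
--
-- def _build_downstream_map(normalized_deps: dict[str, list[str]]) -> dict[str, list[str]]:
--     downstream: dict[str, list[str]] = defaultdict(list)
--     for table, dependencies in normalized_deps.items():
--         for dependency in dependencies:
--             downstream[dependency].append(table)
--     for refs in downstream.values():
--         refs.sort()
--     return dict(downstream)
-- ===== SOURCE B (Python) =====
-- def _build_downstream_map(normalized_deps: dict[str, list[str]]) -> dict[str, list[str]]: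
--     # Flatten to a (dependency, table) edge list, then group by dependency
--     # (first-appearance key order) with a sorted per-key scan.
--     edges = [(dep, table) for table, deps in normalized_deps.items() for dep in deps]
--     keys = dict.fromkeys(dep for dep, _ in edges)
--     return {k: sorted(t for d, t in edges if d == k) for k in keys}
-- ===== Notes on version B (the rewrite author's own statement) =====
-- stated objective: simpler
-- what changed: A incrementally builds a defaultdict of lists in nested loops and then sorts each value list in place; B instead flattens the input to a (dependency, table) edge list once and builds the result as a single comprehension grouping the edges per first-seen dependency with sorted().
import Mathlib
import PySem

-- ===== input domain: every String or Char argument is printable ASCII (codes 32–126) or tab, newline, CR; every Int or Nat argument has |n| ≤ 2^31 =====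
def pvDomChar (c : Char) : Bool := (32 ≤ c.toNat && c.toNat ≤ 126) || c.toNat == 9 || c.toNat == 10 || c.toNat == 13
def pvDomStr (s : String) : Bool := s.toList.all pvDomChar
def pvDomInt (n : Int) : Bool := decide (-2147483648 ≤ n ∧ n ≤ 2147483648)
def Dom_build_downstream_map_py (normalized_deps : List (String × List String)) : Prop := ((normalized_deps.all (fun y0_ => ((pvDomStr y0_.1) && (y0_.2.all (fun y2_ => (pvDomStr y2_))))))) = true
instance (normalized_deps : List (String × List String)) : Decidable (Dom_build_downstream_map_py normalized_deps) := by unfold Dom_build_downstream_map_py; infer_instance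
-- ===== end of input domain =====

-- B replaces A's incremental defaultdict-then-sort-in-place construction with a flat
-- (dependency, table) edge list grouped per first-seen dependency by one comprehension
-- (objective: simpler decomposition, same result).

-- ===== PORT A =====
-- downstream = defaultdict(list); for table, deps in items: for dep in deps:
--   downstream[dep].append(table); then refs.sort() for each value; return dict(downstream).
def build_downstream_map_py (normalized_deps : List (String × List String)) : List (String × List String) :=
  (normalized_deps.foldl
    (fun d p => p.2.foldl (fun d dep => d.modify dep [] (fun refs => refs ++ [p.1])) d)
    PySem.Dict.empty).items.map
    (fun p => (p.1, PySem.List.sorted p.2 (fun x => x) false))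

-- ===== PORT B =====
-- edges = [(dep, table) …]; keys = dict.fromkeys(dep for dep, _ in edges);
-- return {k: sorted(t for d, t in edges if d == k) for k in keys}.
def build_downstream_map_py_alt (normalized_deps : List (String × List String)) : List (String × List String) :=
  let edges := normalized_deps.flatMap (fun p => p.2.map (fun dep => (dep, p.1)))
  let keys := PySem.Set.ofList (edges.map Prod.fst)
  keys.map (fun k => (k, PySem.List.sorted ((edges.filter (fun q => q.1 == k)).map Prod.snd) (fun x => x) false))

-- ===== PRECONDITION & SPEC =====
def Spec_build_downstream_map_py (normalized_deps : List (String × List String)) (out : List (String × List String)) : Prop := out = build_downstream_map_py_alt normalized_deps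
instance (normalized_deps : List (String × List String)) (out : List (String × List String)) : Decidable (Spec_build_downstream_map_py normalized_deps out) := by unfold Spec_build_downstream_map_py; infer_instance

-- ===== CLAIM (what is proved, stated in full; the proofs are below) =====
def Claim_equal_build_downstream_map_py : Prop := ∀ (normalized_deps : List (String × List String)), Dom_build_downstream_map_py normalized_deps → Spec_build_downstream_map_py normalized_deps (build_downstream_map_py normalized_deps)

-- ===== LEMMAS AND PROOFS =====

-- the (dependency, table) pairs A's nested loops traverse, in order (= B's edge list)
def pvP (L : List (String × List String)) : List (String × String) :=
  L.flatMap (fun p => p.2.map (fun dep => (dep, p.1)))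

-- A's nested loop over (table, deps) pairs is a flat loop over pvP
lemma foldl_nested_eq_pvP {σ : Type} (F : σ → String → String → σ) :
    ∀ (L : List (String × List String)) (d : σ),
    L.foldl (fun d p => p.2.foldl (fun d dep => F d dep p.1) d) d
      = (pvP L).foldl (fun d q => F d q.1 q.2) d := by
  intro L
  induction L with
  | nil => intro d; rfl
  | cons p L ih =>
    intro d
    simp only [pvP, List.flatMap_cons, List.foldl_cons, List.foldl_append, List.foldl_map, ih, pvP]

-- A's result in normal form: keys in first-appearance order, each value sorted afterwards
lemma A_items (L : List (String × List String)) :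
    (List.map (fun p => (p.1, PySem.List.sorted p.2 (fun x => x) false))
      ((List.foldl (fun d q => PySem.Dict.modify d q.1 [] (fun refs => refs ++ [q.2]))
        PySem.Dict.empty (pvP L)).items))
    = (PySem.Set.ofList ((pvP L).map Prod.fst)).map
        (fun k => (k, PySem.List.sorted (((pvP L).filter (fun q => q.1 == k)).map Prod.snd) (fun x => x) false)) := by
  have hnd : (List.foldl (fun d q => PySem.Dict.modify d q.1 [] (fun refs => refs ++ [q.2]))
      PySem.Dict.empty (pvP L)).keys.Nodup := by
    apply PySem.Dict.nodup_keys_foldl_modify_key (pvP L) Prod.fst [] (fun _ q => fun refs => refs ++ [q.2])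
    simp [PySem.Dict.keys_empty]
  rw [PySem.Dict.items_eq_map_keys _ hnd ([] : List String)]
  rw [PySem.Dict.keys_foldl_modify_key (pvP L) Prod.fst [] (fun _ q => fun refs => refs ++ [q.2])]
  rw [List.map_map]
  simp only [PySem.Dict.keys_empty, PySem.Set.update_nil_left]
  apply List.map_congr_left
  intro k hk
  simp only [Function.comp_apply]
  rw [PySem.Dict.getD_foldl_modify_append, PySem.Dict.getD_empty]
  simp

-- ===== VERDICT (by name: the statement is the Claim_ definition above) =====
theorem build_downstream_map_py_spec : Claim_equal_build_downstream_map_py := by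
  intro L _
  unfold Spec_build_downstream_map_py build_downstream_map_py build_downstream_map_py_alt
  rw [foldl_nested_eq_pvP (F := fun d dep t => PySem.Dict.modify d dep [] (fun refs => refs ++ [t]))]
  exact A_items L
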